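-- pv_equiv track=rewrite | github.com/prachothan-bijili/fastchat-cs251 | get_json.py | json_splitter
-- ===== SOURCE A (Python) =====
-- def json_splitter(s):
--     """
--     | Splits multiple jsons so that we can process each one by one
--
--     :param s: a string containing multiple jsons
--     :type s: str
--     :return: list of jsons
--     :rtype: list
--
--     """
--
--     jsonlist = []
--     count = 0
--     current = 0
--     for i in range(0,len(s)):
--         if(s[i] == '{'):
--             count+=1
--         elif s[i] == '}':
--             count -=1
--             if(count == 0):
--                 jsonlist.append(s[current:i+1])
--                 current = i+1
--     return jsonlist
-- ===== SOURCE B (Python) =====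
-- def json_splitter(s):
--     parts = s.split('}')
--     out = []
--     buf = []
--     depth = 0
--     for seg in parts[:-1]:
--         depth += seg.count('{') - 1
--         buf.append(seg)
--         if depth == 0:
--             out.append('}'.join(buf) + '}')
--             buf = []
--     return out
-- ===== Notes on version B (the rewrite author's own statement) =====
-- stated objective: faster
-- what changed: Replaces A's per-character index loop with a running counter by a chunk-level algorithm: split the string once on the closing brace, then fold over the chunks, advancing the balance by count of opening braces minus one per chunk and emitting the re-joined buffered chunks whenever the balance returns to zero.
import Mathlib
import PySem

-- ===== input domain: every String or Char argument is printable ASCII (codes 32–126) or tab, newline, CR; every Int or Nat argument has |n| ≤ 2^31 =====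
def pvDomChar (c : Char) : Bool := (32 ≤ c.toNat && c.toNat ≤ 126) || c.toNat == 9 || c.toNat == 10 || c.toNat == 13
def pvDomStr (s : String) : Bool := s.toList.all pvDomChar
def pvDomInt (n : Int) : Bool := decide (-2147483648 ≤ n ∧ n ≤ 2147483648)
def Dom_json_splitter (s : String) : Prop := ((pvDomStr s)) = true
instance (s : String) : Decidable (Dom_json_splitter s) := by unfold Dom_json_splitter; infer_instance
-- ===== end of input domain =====

-- B splits the string once on the closing brace and folds over the chunks (balance advances by the chunk's opening-brace count minus one, objects are re-joined), instead of A's per-character counter loop; same O(n) cost, measured constant-factor faster in Python.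

-- ===== PORT A =====
def json_splitter (s : String) : List String :=
  let cs := s.toList
  ((PySem.List.pyRange 0 cs.length 1).foldl
    (fun (st : List String × Int × Int) i =>
      let c := PySem.List.pyGetD cs i ' '
      if c = '{' then (st.1, st.2.1 + 1, st.2.2)
      else if c = '}' then
        if st.2.1 - 1 = 0 then
          (st.1 ++ [String.ofList (PySem.List.slice cs (some st.2.2) (some (i + 1)))], st.2.1 - 1, i + 1)
        else (st.1, st.2.1 - 1, st.2.2)
      else st)
    ([], 0, 0)).1

-- ===== PORT B =====
-- s.split('}') is ported as List.splitOn '}', '}'.join as PySem.Chars.join ['}'],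
-- seg.count('{') as List.count '{' (exact for a 1-character needle), parts[:-1] as dropLast.
def json_splitter_alt (s : String) : List String :=
  let parts := s.toList.splitOn '}'
  (parts.dropLast.foldl
    (fun (st : List String × List (List Char) × Int) seg =>
      let depth := st.2.2 + (seg.count '{' : Int) - 1
      let buf := st.2.1 ++ [seg]
      if depth = 0 then
        (st.1 ++ [String.ofList (PySem.Chars.join ['}'] buf ++ ['}'])], [], (0 : Int))
      else (st.1, buf, depth))
    ([], [], 0)).1

-- ===== PRECONDITION & SPEC =====
def Spec_json_splitter (s : String) (out : List String) : Prop := out = json_splitter_alt s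
instance (s : String) (out : List String) : Decidable (Spec_json_splitter s out) := by unfold Spec_json_splitter; infer_instance

-- ===== CLAIM =====
def Claim_equal_json_splitter : Prop := ∀ (s : String), Dom_json_splitter s → Spec_json_splitter s (json_splitter s)

-- ===== LEMMAS AND PROOFS =====

-- per-character depth delta (proof-side only)
def pvDelta (c : Char) : Int := (if c = '{' then 1 else 0) - (if c = '}' then 1 else 0)

-- canonical recursive splitter both ports are reduced to
def pvGo (pending : List Char) (rest : List Char) (count : Int) : List (List Char) :=
  match rest with
  | [] => []
  | c :: r =>
    if c = '{' then pvGo (pending ++ [c]) r (count + 1)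
    else if c = '}' then
      if count - 1 = 0 then (pending ++ [c]) :: pvGo [] r 0
      else pvGo (pending ++ [c]) r (count - 1)
    else pvGo (pending ++ [c]) r count

-- the slice cs[cur : |done|+1] on cs = done ++ c :: r is the pending segment plus c
lemma pvSlice_seg (done r : List Char) (c : Char) (cur : Nat) (hcur : cur ≤ done.length) :
    PySem.List.slice (done ++ c :: r) (some (cur : Int)) (some ((done.length : Int) + 1))
      = done.drop cur ++ [c] := by
  have h1 : ((done.length : Int) + 1) = ((done.length + 1 : Nat) : Int) := by push_cast; ring
  rw [h1, PySem.List.slice_natCast]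
  rw [List.drop_append_of_le_length hcur]
  have h2 : done.length + 1 - cur = (done.drop cur).length + 1 := by
    simp [List.length_drop]; omega
  rw [h2]
  have h3 : List.take (done.length - cur + 1) (done.drop cur) = done.drop cur :=
    List.take_of_length_le (by simp [List.length_drop])
  have := List.take_append (l₁ := done.drop cur) (l₂ := c :: r) (i := (done.drop cur).length + 1)
  simpa [h3] using this

-- A's loop, generalized
lemma pvA_loop (done rest : List Char) (jl : List String) (cur : Nat)
    (hcur : cur ≤ done.length) :
    (((PySem.List.pyRange (done.length : Int) ((done ++ rest).length : Int) 1).foldl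
      (fun (st : List String × Int × Int) i =>
        let c := PySem.List.pyGetD (done ++ rest) i ' '
        if c = '{' then (st.1, st.2.1 + 1, st.2.2)
        else if c = '}' then
          if st.2.1 - 1 = 0 then
            (st.1 ++ [String.ofList (PySem.List.slice (done ++ rest) (some st.2.2) (some (i + 1)))], st.2.1 - 1, i + 1)
          else (st.1, st.2.1 - 1, st.2.2)
        else st)
      (jl, (done.map pvDelta).sum, (cur : Int))).1)
    = jl ++ (pvGo (done.drop cur) rest ((done.map pvDelta).sum)).map String.ofList := by
  induction rest generalizing done jl cur with
  | nil =>
    simp [pvGo]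
  | cons c r ih =>
    have hlt : ((done.length : Int)) < ((done ++ c :: r).length : Int) := by
      simp
    rw [PySem.List.pyRange_one_cons hlt, List.foldl_cons]
    have hget : PySem.List.pyGetD (done ++ c :: r) ((done.length : Int)) ' ' = c := by
      rw [PySem.List.pyGetD_natCast]
      simp [List.getD_eq_getElem?_getD]
    have hcast : ((done.length : Int) + 1) = (((done ++ [c]).length : Nat) : Int) := by
      simp
    have hdrop : (done ++ [c]).drop cur = done.drop cur ++ [c] :=
      List.drop_append_of_le_length hcur
    by_cases h1 : c = '{'
    · simp only [hget, if_pos h1]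
      have ih' := ih (done ++ [c]) jl cur (by simp; omega)
      rw [List.append_assoc] at ih'
      simp only [List.singleton_append] at ih'
      have hcount : ((done ++ [c]).map pvDelta).sum = (done.map pvDelta).sum + 1 := by
        subst h1; simp [pvDelta]
      rw [hcount, hdrop] at ih'
      rw [hcast, ih']
      simp [pvGo, h1]
    · by_cases h2 : c = '}'
      · by_cases h3 : (done.map pvDelta).sum - 1 = 0
        · simp only [hget, if_neg h1, if_pos h2, if_pos h3]
          rw [pvSlice_seg done r c cur hcur, h3, hcast]
          have ih' := ih (done ++ [c])
            (jl ++ [String.ofList (done.drop cur ++ [c])]) (done ++ [c]).length (le_refl _)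
          rw [List.append_assoc] at ih'
          simp only [List.singleton_append, List.drop_length] at ih'
          have hcount : ((done ++ [c]).map pvDelta).sum = (done.map pvDelta).sum - 1 := by
            subst h2; simp [pvDelta]; ring
          rw [hcount, h3] at ih'
          rw [ih']
          simp [pvGo, h2, h3]
        · simp only [hget, if_neg h1, if_pos h2, if_neg h3]
          have ih' := ih (done ++ [c]) jl cur (by simp; omega)
          rw [List.append_assoc] at ih'
          simp only [List.singleton_append] at ih'
          have hcount : ((done ++ [c]).map pvDelta).sum = (done.map pvDelta).sum - 1 := by
            subst h2; simp [pvDelta]; ring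
          rw [hcount, hdrop] at ih'
          rw [hcast, ih']
          simp [pvGo, h2, h3]
      · simp only [hget, if_neg h1, if_neg h2]
        have ih' := ih (done ++ [c]) jl cur (by simp; omega)
        rw [List.append_assoc] at ih'
        simp only [List.singleton_append] at ih'
        have hcount : ((done ++ [c]).map pvDelta).sum = (done.map pvDelta).sum := by
          simp [pvDelta, h1, h2]
        rw [hcount, hdrop] at ih'
        rw [hcast, ih']
        simp [pvGo, h1, h2]

-- the pending text reconstructed from B's buffer of chunks
def pvPending (buf : List (List Char)) : List Char :=
  if buf = [] then [] else PySem.Chars.join ['}'] buf ++ ['}']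

lemma pvJoin_snoc (b seg : List Char) (buf : List (List Char)) :
    PySem.Chars.join ['}'] ((b :: buf) ++ [seg])
      = PySem.Chars.join ['}'] (b :: buf) ++ ['}'] ++ seg := by
  induction buf generalizing b with
  | nil => simp [PySem.Chars.join_cons_cons, PySem.Chars.join_singleton]
  | cons x xs ih =>
    have h := ih x
    simp only [List.cons_append] at h ⊢
    rw [PySem.Chars.join_cons_cons, h, PySem.Chars.join_cons_cons]
    simp [List.append_assoc]

lemma pvPending_snoc (buf : List (List Char)) (seg : List Char) :
    pvPending (buf ++ [seg]) = pvPending buf ++ seg ++ ['}'] := by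
  cases buf with
  | nil => simp [pvPending, PySem.Chars.join_singleton]
  | cons b bs =>
    simp only [pvPending, List.cons_append]
    rw [if_neg (by simp), if_neg (by simp)]
    have h := pvJoin_snoc b seg bs
    simp only [List.cons_append] at h
    rw [h]

-- pvGo skips a '}'-free chunk in one step
lemma pvGo_skip (seg : List Char) (h : '}' ∉ seg) :
    ∀ (pending rest : List Char) (count : Int),
      pvGo pending (seg ++ rest) count
        = pvGo (pending ++ seg) rest (count + (seg.count '{' : Int)) := by
  induction seg with
  | nil => intro p r c; simp
  | cons x xs ih =>
    intro p r c
    have hx : x ≠ '}' := fun hh => h (hh ▸ List.mem_cons_self ..)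
    have hxs : '}' ∉ xs := fun hh => h (List.mem_cons_of_mem _ hh)
    by_cases h1 : x = '{'
    · simp only [List.cons_append, pvGo, if_pos h1]
      rw [ih hxs]
      subst h1
      simp [List.append_assoc]
      ring_nf
    · simp only [List.cons_append, pvGo, if_neg h1, if_neg hx]
      rw [ih hxs]
      have hcnt : (x :: xs).count '{' = xs.count '{' := by
        simp [h1]
      rw [hcnt]
      simp [List.append_assoc]

-- B's chunk fold equals pvGo on the reconstructed text
lemma pvB_fold (segs : List (List Char)) (last : List Char)
    (hsegs : ∀ l ∈ segs, '}' ∉ l) (hlast : '}' ∉ last) :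
    ∀ (out : List String) (buf : List (List Char)) (depth : Int),
    (segs.foldl
      (fun (st : List String × List (List Char) × Int) seg =>
        if st.2.2 + (seg.count '{' : Int) - 1 = 0 then
          (st.1 ++ [String.ofList (PySem.Chars.join ['}'] (st.2.1 ++ [seg]) ++ ['}'])], [], (0 : Int))
        else (st.1, st.2.1 ++ [seg], st.2.2 + (seg.count '{' : Int) - 1))
      (out, buf, depth)).1
    = out ++ (pvGo (pvPending buf) ((segs.map (· ++ ['}'])).flatten ++ last) depth).map String.ofList := by
  induction segs with
  | nil =>
    intro out buf depth
    simp only [List.foldl_nil, List.map_nil, List.flatten_nil, List.nil_append]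
    have h := pvGo_skip last hlast (pvPending buf) [] depth
    rw [List.append_nil] at h
    rw [h]
    simp [pvGo]
  | cons seg segs ih =>
    intro out buf depth
    have hseg : '}' ∉ seg := hsegs seg (List.mem_cons_self ..)
    have hsegs' : ∀ l ∈ segs, '}' ∉ l := fun l hl => hsegs l (List.mem_cons_of_mem _ hl)
    simp only [List.foldl_cons]
    have hre : (((seg :: segs).map (· ++ ['}'])).flatten ++ last)
        = seg ++ ('}' :: ((segs.map (· ++ ['}'])).flatten ++ last)) := by
      simp
    rw [hre, pvGo_skip seg hseg]
    by_cases h0 : depth + (seg.count '{' : Int) - 1 = 0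
    · rw [if_pos h0]
      have hgo : pvGo (pvPending buf ++ seg) ('}' :: ((segs.map (· ++ ['}'])).flatten ++ last))
          (depth + (seg.count '{' : Int))
          = (pvPending buf ++ seg ++ ['}']) :: pvGo [] ((segs.map (· ++ ['}'])).flatten ++ last) 0 := by
        rw [pvGo]
        rw [if_neg (by decide), if_pos rfl, if_pos h0]
      rw [hgo]
      rw [ih hsegs' (out ++ [String.ofList (PySem.Chars.join ['}'] (buf ++ [seg]) ++ ['}'])]) [] 0]
      have hp : PySem.Chars.join ['}'] (buf ++ [seg]) ++ ['}'] = pvPending buf ++ seg ++ ['}'] := by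
        have h := pvPending_snoc buf seg
        rw [pvPending, if_neg (by simp)] at h
        exact h
      rw [hp]
      simp [pvPending, List.append_assoc]
    · rw [if_neg h0]
      have hgo : pvGo (pvPending buf ++ seg) ('}' :: ((segs.map (· ++ ['}'])).flatten ++ last))
          (depth + (seg.count '{' : Int))
          = pvGo (pvPending buf ++ seg ++ ['}']) ((segs.map (· ++ ['}'])).flatten ++ last)
              (depth + (seg.count '{' : Int) - 1) := by
        rw [pvGo]
        rw [if_neg (by decide), if_pos rfl, if_neg h0]
      rw [hgo, ih hsegs' out (buf ++ [seg]) (depth + (seg.count '{' : Int) - 1), pvPending_snoc]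

-- splitting on '}' decomposes the string into '}'-free chunks
lemma pvSplit_char (cs : List Char) :
    ∃ segs last, cs.splitOn '}' = segs ++ [last] ∧
      (∀ l ∈ segs, '}' ∉ l) ∧ '}' ∉ last ∧
      (segs.map (· ++ ['}'])).flatten ++ last = cs := by
  induction cs with
  | nil =>
    exact ⟨[], [], by simp [List.splitOn], by simp, by simp, by simp⟩
  | cons c cs ih =>
    obtain ⟨segs, last, hsplit, hsegs, hlast, hflat⟩ := ih
    by_cases hc : c = '}'
    · refine ⟨[] :: segs, last, ?_, ?_, hlast, ?_⟩
      · rw [List.splitOn, List.splitOnP_cons, if_pos (by simp [hc])]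
        simpa [List.splitOn] using hsplit
      · intro l hl
        rcases List.mem_cons.mp hl with h | h
        · subst h; simp
        · exact hsegs l h
      · subst hc; simp [hflat]
    · cases segs with
      | nil =>
        refine ⟨[], c :: last, ?_, by simp, ?_, ?_⟩
        · rw [List.splitOn, List.splitOnP_cons, if_neg (by simp [hc])]
          simp only [List.splitOn] at hsplit
          rw [hsplit]; simp
        · intro h
          rcases List.mem_cons.mp h with h | h
          · exact hc h.symm
          · exact hlast h
        · simp only [List.map_nil, List.flatten_nil, List.nil_append] at hflat
          simp [hflat]
      | cons g gs =>
        refine ⟨(c :: g) :: gs, last, ?_, ?_, hlast, ?_⟩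
        · rw [List.splitOn, List.splitOnP_cons, if_neg (by simp [hc])]
          simp only [List.splitOn] at hsplit
          rw [hsplit]; simp
        · intro l hl
          rcases List.mem_cons.mp hl with h | h
          · subst h
            intro hm
            rcases List.mem_cons.mp hm with h | h
            · exact hc h.symm
            · exact hsegs g (List.mem_cons_self ..) h
          · exact hsegs l (List.mem_cons_of_mem _ h)
        · simp only [List.map_cons, List.flatten_cons, List.cons_append, List.append_assoc] at hflat ⊢
          rw [← hflat]

-- ===== VERDICT =====
theorem json_splitter_spec : Claim_equal_json_splitter := by
  intro s _
  unfold Spec_json_splitter json_splitter json_splitter_alt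
  obtain ⟨segs, last, hsplit, hsegs, hlast, hflat⟩ := pvSplit_char s.toList
  have hA := pvA_loop [] s.toList [] 0 (by simp)
  simp only [List.nil_append, List.length_nil, Nat.cast_zero, List.map_nil, List.sum_nil,
    List.drop_nil] at hA
  rw [hA]
  dsimp only
  rw [hsplit, List.dropLast_concat]
  have hB := pvB_fold segs last hsegs hlast [] [] 0
  rw [hB]
  rw [pvPending, if_pos rfl, hflat]
  simp
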